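-- pv_equiv track=rewrite | github.com/lmrae0624/Algorithm | 프로그래머스/**최솟값 만들기.py | solution
-- ===== SOURCE A (Python) =====
-- def solution(A,B):
--     answer = 0
--     A.sort()
--     B.sort()
--
--     alist=A.copy()
--     blist=B.copy()
--
--     while alist:
--         answer+=alist.pop(0)*blist.pop(-1)
--
--     A.sort(reverse=True)
--     B.sort(reverse=True)
--     tmp=0
--     while A:
--         tmp+=A.pop(-1)*B.pop()
--
--     return min(answer,tmp)
-- ===== SOURCE B (Python) =====
-- def solution(A, B):
--     sa, sb = sorted(A), sorted(B)
--     low = sum(a * b for a, b in zip(sa, reversed(sb)))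
--     high = sum(a * b for a, b in zip(sa, sb))
--     return min(low, high)
-- ===== Notes on version B (the rewrite author's own statement) =====
-- stated objective: faster
-- what changed: B replaces A's two destructive pop-loops over copied/re-sorted lists (pop(0) shifts the whole list each step) with two non-mutating zip sums over one ascending sort of each list; equivalence is about the return value only - A sorts and empties its argument lists in place, B does not mutate them.
import Mathlib
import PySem

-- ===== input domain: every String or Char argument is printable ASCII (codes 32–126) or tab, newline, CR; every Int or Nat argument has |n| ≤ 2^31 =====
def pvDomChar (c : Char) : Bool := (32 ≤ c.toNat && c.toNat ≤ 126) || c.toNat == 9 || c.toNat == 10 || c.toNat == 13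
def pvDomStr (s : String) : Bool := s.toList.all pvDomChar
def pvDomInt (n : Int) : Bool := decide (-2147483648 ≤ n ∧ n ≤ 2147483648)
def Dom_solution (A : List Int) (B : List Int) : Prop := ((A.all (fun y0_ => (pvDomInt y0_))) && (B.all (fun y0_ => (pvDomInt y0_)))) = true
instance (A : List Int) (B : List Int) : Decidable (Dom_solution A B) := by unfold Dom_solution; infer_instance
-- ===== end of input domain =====

-- B replaces A's two destructive pop-loops (pop(0) is O(n) each step) with two non-mutating
-- zip sums over single ascending sorts; equivalence is about the return value only:
-- A sorts/empties its argument lists in place, B does not.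

-- ===== PORT A =====
-- while alist: answer += alist.pop(0) * blist.pop(-1)
-- (on empty blist Python raises IndexError; that input is excluded by Pre_solution)
def pvLoop1 : List Int → List Int → Int → Int
  | [], _, answer => answer
  | a :: alist, blist, answer =>
    match blist.getLast? with
    | some b => pvLoop1 alist blist.dropLast (answer + a * b)
    | none => answer  -- IndexError in Python; unreachable under Pre_solution

-- while A: tmp += A.pop(-1) * B.pop()
-- (on empty B Python raises IndexError; that input is excluded by Pre_solution)
def pvLoop2 (A : List Int) (B : List Int) (tmp : Int) : Int :=
  match hA : A.getLast? with
  | none => tmp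
  | some a =>
    match B.getLast? with
    | some b => pvLoop2 A.dropLast B.dropLast (tmp + a * b)
    | none => tmp  -- IndexError in Python; unreachable under Pre_solution
termination_by A.length
decreasing_by
  cases A with
  | nil => simp at hA
  | cons x xs => simp [List.length_dropLast]

def solution (A : List Int) (B : List Int) : Int :=
  let A1 := PySem.List.sorted A (fun x => x) false
  let B1 := PySem.List.sorted B (fun x => x) false
  let answer := pvLoop1 A1 B1 0
  let A2 := PySem.List.sorted A (fun x => x) true
  let B2 := PySem.List.sorted B (fun x => x) true
  let tmp := pvLoop2 A2 B2 0
  min answer tmp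

-- ===== PORT B =====
def solution_alt (A : List Int) (B : List Int) : Int :=
  let sa := PySem.List.sorted A (fun x => x) false
  let sb := PySem.List.sorted B (fun x => x) false
  let low := ((sa.zip sb.reverse).map (fun p => p.1 * p.2)).sum
  let high := ((sa.zip sb).map (fun p => p.1 * p.2)).sum
  min low high

-- ===== PRECONDITION & SPEC =====
-- Pre_ excludes only len(A) > len(B), where A raises IndexError popping from the exhausted B list.
def Pre_solution (A : List Int) (B : List Int) : Prop := A.length ≤ B.length
instance (A : List Int) (B : List Int) : Decidable (Pre_solution A B) := by unfold Pre_solution; infer_instance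
def pvWitness_solution : List Int × List Int := ([1, 2], [3, 4])

def Spec_solution (A : List Int) (B : List Int) (out : Int) : Prop := out = solution_alt A B
instance (A : List Int) (B : List Int) (out : Int) : Decidable (Spec_solution A B out) := by unfold Spec_solution; infer_instance

-- ===== CLAIM (what is proved, stated in full; the proofs are below) =====
def Claim_equal_solution : Prop := ∀ (A : List Int) (B : List Int), Dom_solution A B → Pre_solution A B → Spec_solution A B (solution A B)
-- ===== LEMMAS AND PROOFS =====

-- loop 1 sums A-ascending against B-descending (reverse of ys)
theorem pvLoop1_eq (xs : List Int) : ∀ (ys : List Int) (acc : Int),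
    xs.length ≤ ys.length →
    pvLoop1 xs ys acc = acc + (List.zipWith (· * ·) xs ys.reverse).sum := by
  induction xs with
  | nil => intro ys acc h; simp [pvLoop1]
  | cons x xs ih =>
    intro ys acc h
    have hys : ys ≠ [] := by
      intro hnil; subst hnil; simp at h
    have hsplit : ys.dropLast ++ [ys.getLast hys] = ys := List.dropLast_append_getLast hys
    have hlast : ys.getLast? = some (ys.getLast hys) := List.getLast?_eq_some_getLast hys
    have hlen : xs.length ≤ ys.dropLast.length := by
      simp at h
      simp [List.length_dropLast]
      omega
    have hrev : ys.reverse = ys.getLast hys :: ys.dropLast.reverse := by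
      conv_lhs => rw [← hsplit]
      simp
    rw [pvLoop1, hlast]
    simp only []
    rw [ih ys.dropLast _ hlen, hrev]
    simp
    ring

-- loop 2 consumes both lists from the back, summing reversed zips
theorem pvLoop2_eq (xs : List Int) : ∀ (ys : List Int) (tmp : Int),
    xs.length ≤ ys.length →
    pvLoop2 xs ys tmp = tmp + (List.zipWith (· * ·) xs.reverse ys.reverse).sum := by
  induction xs using List.reverseRecOn with
  | nil => intro ys tmp h; rw [pvLoop2]; simp
  | append_singleton xs a ih =>
    intro ys tmp h
    have hys : ys ≠ [] := by
      intro hnil; subst hnil; simp at h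
    have hsplit : ys.dropLast ++ [ys.getLast hys] = ys := List.dropLast_append_getLast hys
    have hlastY : ys.getLast? = some (ys.getLast hys) := List.getLast?_eq_some_getLast hys
    have hlastX : (xs ++ [a]).getLast? = some a := by simp
    have hlen : xs.length ≤ ys.dropLast.length := by
      simp at h
      simp [List.length_dropLast]
      omega
    rw [pvLoop2, hlastX]
    simp only [hlastY]
    rw [List.dropLast_concat, ih ys.dropLast _ hlen]
    have hrev : ys.reverse = ys.getLast hys :: ys.dropLast.reverse := by
      conv_lhs => rw [← hsplit]
      simp
    rw [hrev]
    simp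
    ring

-- descending sort is the reverse of the ascending sort (Int values; duplicates are equal values)
theorem sorted_rev_eq_reverse (L : List Int) :
    PySem.List.sorted L (fun x => x) true = (PySem.List.sorted L (fun x => x) false).reverse := by
  have h : (PySem.List.sorted L (fun x => x) true).reverse
      = PySem.List.sorted L (fun x => x) false := by
    apply List.Perm.eq_of_pairwise' (r := (fun a b : Int => a ≤ b))
    · rw [List.pairwise_reverse]
      exact PySem.List.sorted_pairwise_rev L (fun x => x)
    · exact PySem.List.sorted_pairwise L (fun x => x)
    · exact (List.reverse_perm _).trans
        ((PySem.List.sorted_perm L (fun x => x) true).trans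
          (PySem.List.sorted_perm L (fun x => x) false).symm)
  rw [← h, List.reverse_reverse]

-- ===== VERDICT (by name: the statement is the Claim_ definition above) =====
theorem solution_spec : Claim_equal_solution := by
  intro A B _ hpre
  unfold Spec_solution solution solution_alt
  show min (pvLoop1 (PySem.List.sorted A (fun x => x) false)
        (PySem.List.sorted B (fun x => x) false) 0)
      (pvLoop2 (PySem.List.sorted A (fun x => x) true)
        (PySem.List.sorted B (fun x => x) true) 0)
    = min (((PySem.List.sorted A (fun x => x) false).zip
          (PySem.List.sorted B (fun x => x) false).reverse).map (fun p => p.1 * p.2)).sum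
        (((PySem.List.sorted A (fun x => x) false).zip
          (PySem.List.sorted B (fun x => x) false)).map (fun p => p.1 * p.2)).sum
  rw [sorted_rev_eq_reverse A, sorted_rev_eq_reverse B]
  set sa := PySem.List.sorted A (fun x => x) false with hsa
  set sb := PySem.List.sorted B (fun x => x) false with hsb
  have hlen : sa.length ≤ sb.length := by
    rw [hsa, hsb, PySem.List.length_sorted, PySem.List.length_sorted]
    exact hpre
  rw [pvLoop1_eq sa sb 0 hlen, pvLoop2_eq sa.reverse sb.reverse 0 (by simp [hlen])]
  simp only [List.reverse_reverse, zero_add]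
  have hzm : ∀ (xs ys : List Int), ((xs.zip ys).map (fun p => p.1 * p.2)).sum
      = (List.zipWith (· * ·) xs ys).sum := by
    intro xs ys
    rw [List.zip, List.map_zipWith]
  rw [hzm, hzm]
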